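-- pv_equiv track=rewrite | github.com/rainbowbrained/RL_tetris | build_report.py | infer_policy_arch_from_state_dict
-- ===== SOURCE A (Python) =====
-- from typing import Any, Dict, Iterable, List, Optional, Tuple
--
-- def infer_policy_arch_from_state_dict(sd: Dict[str, Any]) -> str:
--     keys = list(sd.keys())
--     if any(k.startswith("conv.") or ".conv." in k for k in keys):
--         return "cnn"
--     if any(k.startswith("shared.") or ".shared." in k for k in keys):
--         return "mlp"
--     if any(k.startswith("fc.") or ".fc." in k for k in keys):
--         # Could still be CNN+FC, but if no conv keys exist it's most likely MLP.
--         return "mlp"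
--     return "unknown"
-- ===== SOURCE B (Python) =====
-- def infer_policy_arch_from_state_dict(sd):
--     LABELS = ("cnn", "mlp", "unknown")
--
--     def rank(k):
--         if k.startswith("conv.") or ".conv." in k:
--             return 0
--         if (k.startswith("shared.") or ".shared." in k
--                 or k.startswith("fc.") or ".fc." in k):
--             return 1
--         return 2
--
--     best = 2
--     for k in sd.keys():
--         best = min(best, rank(k))
--     return LABELS[best]
-- ===== Notes on version B (the rewrite author's own statement) =====
-- stated objective: alternative
-- what changed: Replaces three separate short-circuiting any() scans (conv, then shared, then fc) by a single fold that maps every key to a numeric priority rank (conv=0, shared/fc=1, other=2), takes the minimum rank, and indexes a label table.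
import Mathlib
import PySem

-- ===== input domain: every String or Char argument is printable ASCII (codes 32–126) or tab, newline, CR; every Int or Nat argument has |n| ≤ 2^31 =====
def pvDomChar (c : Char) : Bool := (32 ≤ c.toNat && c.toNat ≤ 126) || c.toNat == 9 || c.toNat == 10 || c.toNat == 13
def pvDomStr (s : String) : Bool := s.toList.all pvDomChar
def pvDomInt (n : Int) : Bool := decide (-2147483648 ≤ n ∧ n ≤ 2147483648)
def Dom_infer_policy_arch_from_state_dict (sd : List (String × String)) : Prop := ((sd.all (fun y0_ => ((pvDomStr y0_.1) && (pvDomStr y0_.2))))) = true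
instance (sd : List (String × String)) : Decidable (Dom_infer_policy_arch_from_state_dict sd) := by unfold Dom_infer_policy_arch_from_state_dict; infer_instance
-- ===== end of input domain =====

-- B replaces A's three short-circuiting any() scans by one min-rank fold over the keys plus a label-table lookup (alternative decomposition, same cost).


-- ===== PORT A =====
def infer_policy_arch_from_state_dict (sd : List (String × String)) : String :=
  let keys := (PySem.Dict.mk sd).keys
  if keys.any (fun k => PySem.Str.startswith k "conv." || PySem.Str.isIn ".conv." k) then "cnn"
  else if keys.any (fun k => PySem.Str.startswith k "shared." || PySem.Str.isIn ".shared." k) then "mlp"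
  else if keys.any (fun k => PySem.Str.startswith k "fc." || PySem.Str.isIn ".fc." k) then "mlp"
  else "unknown"

-- ===== PORT B =====
-- B maps each key to a priority rank (conv=0, shared/fc=1, other=2), folds min, indexes a label table.
def pvRank (k : String) : Nat :=
  if PySem.Str.startswith k "conv." || PySem.Str.isIn ".conv." k then 0
  else if PySem.Str.startswith k "shared." || PySem.Str.isIn ".shared." k
          || PySem.Str.startswith k "fc." || PySem.Str.isIn ".fc." k then 1
  else 2

def infer_policy_arch_from_state_dict_alt (sd : List (String × String)) : String :=
  let best := ((PySem.Dict.mk sd).keys).foldl (fun b k => min b (pvRank k)) 2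
  (PySem.List.pyGet? ["cnn", "mlp", "unknown"] best).getD ""

-- ===== PRECONDITION & SPEC =====
def Spec_infer_policy_arch_from_state_dict (sd : List (String × String)) (out : String) : Prop := out = infer_policy_arch_from_state_dict_alt sd
instance (sd : List (String × String)) (out : String) : Decidable (Spec_infer_policy_arch_from_state_dict sd out) := by unfold Spec_infer_policy_arch_from_state_dict; infer_instance

-- ===== CLAIM (what is proved, stated in full; the proofs are below) =====
def Claim_equal_infer_policy_arch_from_state_dict : Prop := ∀ (sd : List (String × String)), Dom_infer_policy_arch_from_state_dict sd → Spec_infer_policy_arch_from_state_dict sd (infer_policy_arch_from_state_dict sd)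

-- ===== LEMMAS AND PROOFS =====
def pcK (k : String) : Bool := PySem.Str.startswith k "conv." || PySem.Str.isIn ".conv." k
def psK (k : String) : Bool := PySem.Str.startswith k "shared." || PySem.Str.isIn ".shared." k
def pfK (k : String) : Bool := PySem.Str.startswith k "fc." || PySem.Str.isIn ".fc." k

theorem pvRank_eq (k : String) :
    pvRank k = if pcK k then 0 else if psK k || pfK k then 1 else 2 := by
  unfold pvRank pcK psK pfK
  rcases PySem.Str.startswith k "shared." <;> rcases PySem.Str.isIn ".shared." k <;>
    rcases PySem.Str.startswith k "fc." <;> rcases PySem.Str.isIn ".fc." k <;> simp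

theorem pvRank_cases (k : String) : pvRank k = 0 ∨ pvRank k = 1 ∨ pvRank k = 2 := by
  rw [pvRank_eq]; split_ifs <;> omega

theorem pvRank_zero_iff (k : String) : pvRank k = 0 ↔ pcK k = true := by
  rw [pvRank_eq]; split_ifs with h <;> simp [h]

theorem pvRank_one_s (k : String) (h1 : pcK k = false) (h2 : psK k = true) : pvRank k = 1 := by
  rw [pvRank_eq]; simp [h1, h2]

theorem pvRank_one_f (k : String) (h1 : pcK k = false) (h2 : pfK k = true) : pvRank k = 1 := by
  rw [pvRank_eq]; simp [h1, h2]

theorem pvRank_two (k : String) (h1 : pcK k = false) (h2 : psK k = false) (h3 : pfK k = false) :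
    pvRank k = 2 := by
  rw [pvRank_eq]; simp [h1, h2, h3]

theorem fold_min_rank (keys : List String) (b : Nat) (hb : b ≤ 2) :
    keys.foldl (fun b k => min b (pvRank k)) b
      = (if keys.any (fun k => decide (pvRank k = 0)) then 0
         else if keys.any (fun k => decide (pvRank k = 1)) then min b 1 else b) := by
  induction keys generalizing b with
  | nil => simp
  | cons k ks ih =>
    rw [List.foldl_cons, ih _ (le_trans (Nat.min_le_left _ _) hb)]
    simp only [List.any_cons]
    rcases pvRank_cases k with h | h | h <;> simp only [h] <;> split_ifs <;>
      simp_all [Nat.min_def] <;> first | omega | tauto | (split_ifs <;> omega)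

-- ===== VERDICT (by name: the statement is the Claim_ definition above) =====
theorem infer_policy_arch_from_state_dict_spec : Claim_equal_infer_policy_arch_from_state_dict := by
  intro sd _
  unfold Spec_infer_policy_arch_from_state_dict
  unfold infer_policy_arch_from_state_dict infer_policy_arch_from_state_dict_alt
  rw [fold_min_rank _ _ (by omega)]
  cases hC : (PySem.Dict.mk sd).keys.any
      (fun k => PySem.Str.startswith k "conv." || PySem.Str.isIn ".conv." k) with
  | true =>
    obtain ⟨k, hk, hpk⟩ := List.any_eq_true.1 hC
    have h0 : ((PySem.Dict.mk sd).keys.any (fun k => decide (pvRank k = 0))) = true :=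
      List.any_eq_true.2 ⟨k, hk, decide_eq_true ((pvRank_zero_iff k).2 hpk)⟩
    simp only [hC, h0]
    rfl
  | false =>
    have hall : ∀ k ∈ (PySem.Dict.mk sd).keys, pcK k = false := by
      intro k hk
      have := List.any_eq_false.1 hC k hk
      exact Bool.eq_false_iff.2 this
    have h0 : ((PySem.Dict.mk sd).keys.any (fun k => decide (pvRank k = 0))) = false := by
      rw [List.any_eq_false]
      intro k hk
      simp [pvRank_zero_iff, hall k hk]
    cases hs : (PySem.Dict.mk sd).keys.any
        (fun k => PySem.Str.startswith k "shared." || PySem.Str.isIn ".shared." k) with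
    | true =>
      obtain ⟨k, hk, hpk⟩ := List.any_eq_true.1 hs
      have h1 : ((PySem.Dict.mk sd).keys.any (fun k => decide (pvRank k = 1))) = true :=
        List.any_eq_true.2 ⟨k, hk, decide_eq_true (pvRank_one_s k (hall k hk) hpk)⟩
      simp only [hC, hs, h0, h1]
      rfl
    | false =>
      cases hf : (PySem.Dict.mk sd).keys.any
          (fun k => PySem.Str.startswith k "fc." || PySem.Str.isIn ".fc." k) with
      | true =>
        obtain ⟨k, hk, hpk⟩ := List.any_eq_true.1 hf
        have h1 : ((PySem.Dict.mk sd).keys.any (fun k => decide (pvRank k = 1))) = true :=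
          List.any_eq_true.2 ⟨k, hk, decide_eq_true (pvRank_one_f k (hall k hk) hpk)⟩
        simp only [hC, hs, hf, h0, h1]
        rfl
      | false =>
        have h1 : ((PySem.Dict.mk sd).keys.any (fun k => decide (pvRank k = 1))) = false := by
          rw [List.any_eq_false]
          intro k hk
          have hsk := Bool.eq_false_iff.2 (List.any_eq_false.1 hs k hk)
          have hfk := Bool.eq_false_iff.2 (List.any_eq_false.1 hf k hk)
          simp [pvRank_two k (hall k hk) hsk hfk]
        simp only [hC, hs, hf, h0, h1]
        rfl
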